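-- pv_equiv track=rewrite | github.com/mijail73/URI_PROBLEMS | BEGINNER/Uri1478.py | llenaMatriz
-- ===== SOURCE A (Python) =====
-- def llenaMatriz(entrada):
--     numerosuperior = 1
--     numeroinferior = 1
--     matrix = [[1 for x in range(entrada)] for y in range(entrada)]
--     for row in range(len(matrix)):
--         for val in range(len(matrix)):
--             if(row > val):  # matriz inferior, sin diagonal
--                 numeroinferior -= 1
--                 matrix[row][val] = numeroinferior
--             elif(val > row):  # matriz superior, sin diagonal
--                 numerosuperior += 1
--                 matrix[row][val] = numerosuperior
--         numeroinferior = row + 3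
--         numerosuperior = 1
--     return matrix
-- ===== SOURCE B (Python) =====
-- def llenaMatriz(entrada):
--     return [[abs(r - c) + 1 for c in range(entrada)] for r in range(entrada)]
-- ===== Notes on version B (the rewrite author's own statement) =====
-- stated objective: simpler
-- what changed: Replaces the stateful diagonal counters (numeroinferior/numerosuperior) and per-cell branching with the closed-form formula matrix[r][c] = abs(r-c)+1 computed directly in a nested comprehension.
import Mathlib
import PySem

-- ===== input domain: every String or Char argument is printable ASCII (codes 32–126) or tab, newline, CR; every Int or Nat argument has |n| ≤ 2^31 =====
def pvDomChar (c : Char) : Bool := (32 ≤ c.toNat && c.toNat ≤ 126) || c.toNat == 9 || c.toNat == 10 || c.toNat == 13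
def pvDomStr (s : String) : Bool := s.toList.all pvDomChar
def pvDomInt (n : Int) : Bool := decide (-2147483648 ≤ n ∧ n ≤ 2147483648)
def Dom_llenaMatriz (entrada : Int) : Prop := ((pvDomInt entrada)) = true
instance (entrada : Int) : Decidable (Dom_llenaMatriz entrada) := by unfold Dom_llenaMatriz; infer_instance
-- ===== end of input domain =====

-- B replaces A's stateful diagonal counters and per-cell branching by the closed form
-- matrix[r][c] = |r-c|+1 computed directly in a nested comprehension (simpler).

-- ===== PORT A =====
-- loop state = (matrix, numeroinferior, numerosuperior)
def innerStep (row : Int) (s : List (List Int) × Int × Int) (val : Int) :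
    List (List Int) × Int × Int :=
  if row > val then
    let ni := s.2.1 - 1
    (PySem.List.pySetD s.1 row (PySem.List.pySetD (PySem.List.pyGetD s.1 row []) val ni),
     ni, s.2.2)
  else if val > row then
    let ns := s.2.2 + 1
    (PySem.List.pySetD s.1 row (PySem.List.pySetD (PySem.List.pyGetD s.1 row []) val ns),
     s.2.1, ns)
  else s

def outerStep (s : List (List Int) × Int × Int) (row : Int) :
    List (List Int) × Int × Int :=
  let st2 := (PySem.List.pyRange 0 (PySem.List.len s.1) 1).foldl (innerStep row) s
  (st2.1, row + 3, 1)

def llenaMatriz (entrada : Int) : List (List Int) :=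
  let matrix : List (List Int) :=
    (PySem.List.pyRange 0 entrada 1).map (fun _y =>
      (PySem.List.pyRange 0 entrada 1).map (fun _x => (1 : Int)))
  ((PySem.List.pyRange 0 (PySem.List.len matrix) 1).foldl outerStep (matrix, 1, 1)).1

-- ===== PORT B =====
def llenaMatriz_alt (entrada : Int) : List (List Int) :=
  (PySem.List.pyRange 0 entrada 1).map (fun r =>
    (PySem.List.pyRange 0 entrada 1).map (fun c => |r - c| + 1))

-- ===== PRECONDITION & SPEC =====
def Spec_llenaMatriz (entrada : Int) (out : List (List Int)) : Prop := out = llenaMatriz_alt entrada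
instance (entrada : Int) (out : List (List Int)) : Decidable (Spec_llenaMatriz entrada out) := by unfold Spec_llenaMatriz; infer_instance

-- ===== CLAIM (what is proved, stated in full; the proofs are below) =====
def Claim_equal_llenaMatriz : Prop := ∀ (entrada : Int), Dom_llenaMatriz entrada → Spec_llenaMatriz entrada (llenaMatriz entrada)

-- ===== LEMMAS AND PROOFS =====

-- the closed-form row B produces: tgt L r = [|r-c|+1 for c in range(L)]
def tgt (L r : Int) : List Int := (PySem.List.pyRange 0 L 1).map (fun c => |r - c| + 1)

-- A's inner loop, restricted to the one row it touches
def rowStep (r : Int) (s : List Int × Int × Int) (c : Int) : List Int × Int × Int :=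
  if r > c then (PySem.List.pySetD s.1 c (s.2.1 - 1), s.2.1 - 1, s.2.2)
  else if c > r then (PySem.List.pySetD s.1 c (s.2.2 + 1), s.2.1, s.2.2 + 1)
  else s

lemma getD_setD (M : List (List Int)) (r : Int) (ρ : List Int)
    (h0 : 0 ≤ r) (hr : r < (M.length : Int)) :
    PySem.List.pyGetD (PySem.List.pySetD M r ρ) r [] = ρ := by
  rw [PySem.List.pySetD_of_nonneg _ _ h0,
      PySem.List.pyGetD_eq_getElem _ _ h0 (by simpa using hr)]
  simp

lemma setD_setD (M : List (List Int)) (r : Int) (ρ ρ' : List Int) (h0 : 0 ≤ r) :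
    PySem.List.pySetD (PySem.List.pySetD M r ρ) r ρ' = PySem.List.pySetD M r ρ' := by
  rw [PySem.List.pySetD_of_nonneg _ _ h0, PySem.List.pySetD_of_nonneg _ _ h0,
      PySem.List.pySetD_of_nonneg _ _ h0, List.set_set]

-- the inner loop only ever writes row r: it is rowStep lifted through pySetD
lemma lift_inner (r : Int) (h0 : 0 ≤ r) (M : List (List Int)) (hr : r < (M.length : Int)) :
    ∀ (cs : List Int) (ρ : List Int) (inf sup : Int),
      cs.foldl (innerStep r) (PySem.List.pySetD M r ρ, inf, sup)
        = ((PySem.List.pySetD M r (cs.foldl (rowStep r) (ρ, inf, sup)).1),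
           (cs.foldl (rowStep r) (ρ, inf, sup)).2) := by
  intro cs
  induction cs with
  | nil => intro ρ inf sup; simp
  | cons c cs ih =>
    intro ρ inf sup
    rw [List.foldl_cons, List.foldl_cons]
    by_cases h1 : r > c
    · simp only [innerStep, rowStep, if_pos h1,
        getD_setD M r ρ h0 hr, setD_setD M r ρ _ h0]
      exact ih _ _ _
    · by_cases h2 : c > r
      · simp only [innerStep, rowStep, if_neg h1, if_pos h2,
          getD_setD M r ρ h0 hr, setD_setD M r ρ _ h0]
        exact ih _ _ _
      · simp only [innerStep, rowStep, if_neg h1, if_neg h2]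
        exact ih _ _ _

-- lower band: vals r-k … r-1, all in the 'row > val' branch, write numeroinferior
lemma row_low (r : Int) :
    ∀ (k : Nat) (ρ : List Int) (inf sup : Int), (k : Int) ≤ r → r ≤ (ρ.length : Int) →
      ((PySem.List.pyRange (r - k) r 1).foldl (rowStep r) (ρ, inf, sup)).2 = (inf - k, sup)
      ∧ ((PySem.List.pyRange (r - k) r 1).foldl (rowStep r) (ρ, inf, sup)).1.length = ρ.length
      ∧ ∀ (j : Nat), j < ρ.length →
          ((PySem.List.pyRange (r - k) r 1).foldl (rowStep r) (ρ, inf, sup)).1[j]?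
            = if r - k ≤ (j : Int) ∧ (j : Int) < r then some (inf - ((j : Int) - (r - k)) - 1)
              else ρ[j]? := by
  intro k
  induction k with
  | zero =>
    intro ρ inf sup hk hr
    rw [PySem.List.pyRange_one_eq_nil (by omega)]
    refine ⟨by simp, rfl, ?_⟩
    intro j hj
    rw [List.foldl_nil, if_neg (by omega)]
  | succ k ih =>
    intro ρ inf sup hk hr
    rw [PySem.List.pyRange_one_cons (by omega), List.foldl_cons]
    have hstep : rowStep r (ρ, inf, sup) (r - (k + 1 : Nat))
        = (ρ.set (r - (k + 1 : Nat)).toNat (inf - 1), inf - 1, sup) := by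
      simp only [rowStep, if_pos (by omega : r > r - (k + 1 : Nat))]
      rw [PySem.List.pySetD_of_nonneg _ _ (by omega)]
    have harg : r - (k + 1 : Nat) + 1 = r - (k : Nat) := by push_cast; ring
    rw [hstep, harg]
    obtain ⟨h2, hlen, hget⟩ := ih (ρ.set (r - (k + 1 : Nat)).toNat (inf - 1)) (inf - 1) sup
      (by omega) (by rw [List.length_set]; exact hr)
    refine ⟨by rw [h2]; congr 1; push_cast; ring, by rw [hlen, List.length_set], ?_⟩
    intro j hj
    rw [hget j (by rw [List.length_set]; exact hj)]
    by_cases hc1 : r - (k : Nat) ≤ (j : Int) ∧ (j : Int) < r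
    · rw [if_pos hc1, if_pos (by push_cast at hc1 ⊢; omega)]
      congr 1; push_cast; ring
    · rw [if_neg hc1, List.getElem?_set]
      by_cases he : (j : Int) = r - (k + 1 : Nat)
      · have hth : (r - (k + 1 : Nat)).toNat = j := by omega
        rw [if_pos hth, if_pos (by omega), if_pos (by omega)]
        congr 1; omega
      · rw [if_neg (by omega), if_neg (by omega)]

-- upper band: vals L-k … L-1 with r < L-k, all in the 'val > row' branch, write numerosuperior
lemma row_high (r : Int) (h0 : 0 ≤ r) :
    ∀ (k : Nat) (ρ : List Int) (inf sup : Int), r + k < (ρ.length : Int) →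
      ((PySem.List.pyRange ((ρ.length : Int) - k) (ρ.length : Int) 1).foldl (rowStep r) (ρ, inf, sup)).2
          = (inf, sup + k)
      ∧ ((PySem.List.pyRange ((ρ.length : Int) - k) (ρ.length : Int) 1).foldl (rowStep r) (ρ, inf, sup)).1.length = ρ.length
      ∧ ∀ (j : Nat), j < ρ.length →
          ((PySem.List.pyRange ((ρ.length : Int) - k) (ρ.length : Int) 1).foldl (rowStep r) (ρ, inf, sup)).1[j]?
            = if (ρ.length : Int) - k ≤ (j : Int) then some (sup + ((j : Int) - ((ρ.length : Int) - k)) + 1)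
              else ρ[j]? := by
  intro k
  induction k with
  | zero =>
    intro ρ inf sup hk
    rw [PySem.List.pyRange_one_eq_nil (by omega)]
    refine ⟨by simp, rfl, ?_⟩
    intro j hj
    rw [List.foldl_nil, if_neg (by omega)]
  | succ k ih =>
    intro ρ inf sup hk
    rw [PySem.List.pyRange_one_cons (by omega), List.foldl_cons]
    have hstep : rowStep r (ρ, inf, sup) ((ρ.length : Int) - (k + 1 : Nat))
        = (ρ.set ((ρ.length : Int) - (k + 1 : Nat)).toNat (sup + 1), inf, sup + 1) := by
      simp only [rowStep, if_neg (by omega : ¬ r > (ρ.length : Int) - (k + 1 : Nat)),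
        if_pos (by omega : (ρ.length : Int) - (k + 1 : Nat) > r)]
      rw [PySem.List.pySetD_of_nonneg _ _ (by omega)]
    have harg : (ρ.length : Int) - (k + 1 : Nat) + 1 = (ρ.length : Int) - (k : Nat) := by
      push_cast; ring
    rw [hstep, harg]
    have hlenset : (ρ.set ((ρ.length : Int) - (k + 1 : Nat)).toNat (sup + 1)).length = ρ.length :=
      List.length_set
    obtain ⟨h2, hlen, hget⟩ := ih (ρ.set ((ρ.length : Int) - (k + 1 : Nat)).toNat (sup + 1)) inf (sup + 1)
      (by rw [hlenset]; omega)
    rw [hlenset] at h2 hlen hget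
    refine ⟨by rw [h2]; congr 1; push_cast; ring, hlen, ?_⟩
    intro j hj
    rw [hget j hj]
    by_cases hc1 : (ρ.length : Int) - (k : Nat) ≤ (j : Int)
    · rw [if_pos hc1, if_pos (by omega)]
      congr 1; push_cast; ring
    · rw [if_neg hc1, List.getElem?_set]
      by_cases he : (j : Int) = (ρ.length : Int) - (k + 1 : Nat)
      · have hth : ((ρ.length : Int) - (k + 1 : Nat)).toNat = j := by omega
        rw [if_pos hth, if_pos (by omega), if_pos (by omega)]
        congr 1; omega
      · rw [if_neg (by omega), if_neg (by omega)]

-- the whole inner loop turns an all-ones row into the closed-form row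
lemma row_all (r inf : Int) (ρ : List Int) (h0 : 0 ≤ r) (hr : r < (ρ.length : Int))
    (hinf : r = 0 ∨ inf = r + 2) (hρ : ∀ (j : Nat), j < ρ.length → ρ[j]? = some 1) :
    ((PySem.List.pyRange 0 (ρ.length : Int) 1).foldl (rowStep r) (ρ, inf, 1)).1
      = tgt (ρ.length : Int) r := by
  have hsplit : PySem.List.pyRange 0 (ρ.length : Int) 1
      = PySem.List.pyRange 0 r 1 ++ (PySem.List.pyRange r (r+1) 1
          ++ PySem.List.pyRange (r+1) (ρ.length : Int) 1) := by
    rw [← PySem.List.pyRange_one_append r (r+1) (ρ.length : Int) (by omega) (by omega)]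
    exact PySem.List.pyRange_one_append 0 r (ρ.length : Int) h0 (by omega)
  rw [hsplit, List.foldl_append, List.foldl_append]
  obtain ⟨h2a, hlena, hgeta⟩ := row_low r r.toNat ρ inf 1 (by omega) (by omega)
  rw [show r - (r.toNat : Int) = 0 by omega] at h2a hlena hgeta
  obtain ⟨⟨ρ1, inf1, sup1⟩, hs1⟩ :
      ∃ s, (PySem.List.pyRange 0 r 1).foldl (rowStep r) (ρ, inf, 1) = s := ⟨_, rfl⟩
  rw [hs1] at h2a hlena hgeta ⊢
  simp only [Prod.mk.injEq] at h2a
  obtain ⟨hinf1, hsup1⟩ := h2a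
  have hdiag : (PySem.List.pyRange r (r+1) 1).foldl (rowStep r) (ρ1, inf1, sup1)
      = (ρ1, inf1, sup1) := by
    rw [PySem.List.pyRange_one_singleton, List.foldl_cons, List.foldl_nil]
    simp [rowStep]
  rw [hdiag]
  obtain ⟨h2b, hlenb, hgetb⟩ := row_high r h0 ((ρ.length : Int) - (r+1)).toNat ρ1 inf1 sup1
    (by rw [hlena]; omega)
  rw [hlena] at h2b hlenb hgetb
  rw [show (ρ.length : Int) - ((((ρ.length : Int) - (r+1)).toNat : Int)) = r + 1 by omega]
    at h2b hlenb hgetb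
  apply List.ext_getElem?
  intro i
  by_cases hi : i < ρ.length
  · rw [hgetb i hi, tgt, List.getElem?_map, PySem.List.getElem?_pyRange_one,
      if_pos (by omega : i < ((ρ.length : Int) - 0).toNat), Option.map_some]
    by_cases hcase : r + 1 ≤ (i : Int)
    · rw [if_pos hcase]
      congr 1
      rw [abs_of_nonpos (by omega : r - (0 + (i : Int)) ≤ 0)]
      omega
    · rw [if_neg hcase, hgeta i hi]
      by_cases hlow : 0 ≤ (i : Int) ∧ (i : Int) < r
      · rw [if_pos hlow]
        have hinf' : inf = r + 2 := hinf.resolve_left (by omega)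
        congr 1
        rw [abs_of_nonneg (by omega : 0 ≤ r - (0 + (i : Int)))]
        omega
      · rw [if_neg hlow, hρ i hi]
        congr 1
        rw [show r - (0 + (i : Int)) = 0 by omega]
        simp
  · rw [List.getElem?_eq_none (by rw [hlenb]; omega)]
    rw [List.getElem?_eq_none (by simp [tgt, PySem.List.length_pyRange_one]; omega)]

-- outer loop invariant: rows before v = L-k are done, rows from v on are still all ones
lemma outer_inv :
    ∀ (k : Nat) (M : List (List Int)) (inf : Int) (ones : List Int),
      (k : Int) ≤ (M.length : Int) →
      ones.length = M.length →
      (∀ (j : Nat), j < ones.length → ones[j]? = some 1) →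
      (∀ (i : Nat), (M.length : Int) - k ≤ (i : Int) → i < M.length → M[i]? = some ones) →
      ((M.length : Int) - k = 0 ∨ inf = ((M.length : Int) - k) + 2) →
      ((PySem.List.pyRange ((M.length : Int) - k) (M.length : Int) 1).foldl outerStep (M, inf, 1)).1.length = M.length
      ∧ ∀ (i : Nat), i < M.length →
          ((PySem.List.pyRange ((M.length : Int) - k) (M.length : Int) 1).foldl outerStep (M, inf, 1)).1[i]?
            = if (M.length : Int) - k ≤ (i : Int) then some (tgt (M.length : Int) (i : Int)) else M[i]? := by
  intro k
  induction k with
  | zero =>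
    intro M inf ones hk hlen hones hrows hinf
    rw [PySem.List.pyRange_one_eq_nil (by omega)]
    refine ⟨rfl, ?_⟩
    intro i hi
    rw [List.foldl_nil, if_neg (by omega)]
  | succ k ih =>
    intro M inf ones hk hlen hones hrows hinf
    rw [PySem.List.pyRange_one_cons (by omega), List.foldl_cons]
    have hv0 : (0 : Int) ≤ (M.length : Int) - (k + 1 : Nat) := by omega
    have hvM : (M.length : Int) - (k + 1 : Nat) < (M.length : Int) := by omega
    have hMv : M[((M.length : Int) - (k + 1 : Nat)).toNat]? = some ones :=
      hrows _ (by omega) (by omega)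
    obtain ⟨hlt, hMv'⟩ := List.getElem?_eq_some_iff.mp hMv
    have hself : PySem.List.pySetD M ((M.length : Int) - (k + 1 : Nat)) ones = M := by
      rw [PySem.List.pySetD_of_nonneg _ _ hv0, ← hMv']
      exact List.set_getElem_self hlt
    have hinf' : (M.length : Int) - (k + 1 : Nat) = 0 ∨ inf = ((M.length : Int) - (k + 1 : Nat)) + 2 := by
      push_cast at hinf ⊢; omega
    have hrow := row_all ((M.length : Int) - (k + 1 : Nat)) inf ones hv0 (by omega)
      hinf' hones
    rw [hlen] at hrow
    have hout : outerStep (M, inf, 1) ((M.length : Int) - (k + 1 : Nat))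
        = (PySem.List.pySetD M ((M.length : Int) - (k + 1 : Nat))
             (tgt (M.length : Int) ((M.length : Int) - (k + 1 : Nat))),
           ((M.length : Int) - (k + 1 : Nat)) + 3, 1) := by
      simp only [outerStep, PySem.List.len_eq]
      rw [show ((M, inf, (1 : Int))) = (PySem.List.pySetD M ((M.length : Int) - (k + 1 : Nat)) ones, inf, 1) by rw [hself]]
      rw [lift_inner _ hv0 M hvM _ ones inf 1, hrow]
    rw [hout]
    have hlenM' : (PySem.List.pySetD M ((M.length : Int) - (k + 1 : Nat))
        (tgt (M.length : Int) ((M.length : Int) - (k + 1 : Nat)))).length = M.length := by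
      rw [PySem.List.pySetD_of_nonneg _ _ hv0, List.length_set]
    obtain ⟨ihlen, ihget⟩ := ih (PySem.List.pySetD M ((M.length : Int) - (k + 1 : Nat))
        (tgt (M.length : Int) ((M.length : Int) - (k + 1 : Nat))))
      (((M.length : Int) - (k + 1 : Nat)) + 3) ones
      (by rw [hlenM']; omega) (by rw [hlenM']; exact hlen) hones
      (by
        intro i hi1 hi2
        rw [hlenM'] at hi1 hi2
        rw [PySem.List.pySetD_of_nonneg _ _ hv0, List.getElem?_set,
          if_neg (by push_cast at hi1 ⊢; omega)]
        exact hrows i (by push_cast at hi1 ⊢; omega) hi2)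
      (by rw [hlenM']; right; push_cast; omega)
    rw [hlenM'] at ihlen ihget
    rw [show (M.length : Int) - (k + 1 : Nat) + 1 = (M.length : Int) - (k : Nat) by push_cast; ring]
    refine ⟨ihlen, ?_⟩
    intro i hi
    rw [ihget i hi]
    by_cases hc1 : (M.length : Int) - (k : Nat) ≤ (i : Int)
    · rw [if_pos hc1, if_pos (by omega)]
    · rw [if_neg hc1, PySem.List.pySetD_of_nonneg _ _ hv0, List.getElem?_set]
      by_cases he : (i : Int) = (M.length : Int) - (k + 1 : Nat)
      · rw [if_pos (by omega), if_pos (by omega), if_pos (by omega)]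
        rw [show ((i : Nat) : Int) = (M.length : Int) - (k + 1 : Nat) from he]
      · rw [if_neg (by omega), if_neg (by omega)]

-- ===== VERDICT (by name: the statement is the Claim_ definition above) =====
theorem llenaMatriz_spec : Claim_equal_llenaMatriz := by
  intro entrada _dom
  unfold Spec_llenaMatriz llenaMatriz llenaMatriz_alt
  by_cases hneg : entrada ≤ 0
  · rw [PySem.List.pyRange_one_eq_nil hneg]
    simp [PySem.List.len_eq, PySem.List.pyRange_one_eq_nil le_rfl]
  · rw [not_le] at hneg
    set ones : List Int := (PySem.List.pyRange 0 entrada 1).map (fun _x => (1 : Int)) with hones_def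
    set M0 : List (List Int) := (PySem.List.pyRange 0 entrada 1).map (fun _y => ones) with hM0_def
    have hM0len : M0.length = entrada.toNat := by
      rw [hM0_def]; simp [PySem.List.length_pyRange_one]
    have honeslen : ones.length = entrada.toNat := by
      rw [hones_def]; simp [PySem.List.length_pyRange_one]
    have hcast : ((M0.length : Nat) : Int) = entrada := by rw [hM0len]; omega
    obtain ⟨hRlen, hRget⟩ := outer_inv M0.length M0 1 ones le_rfl
      (by rw [hM0len, honeslen])
      (by
        intro j hj
        rw [hones_def, List.getElem?_map, PySem.List.getElem?_pyRange_one,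
          if_pos (by rw [honeslen] at hj; omega), Option.map_some])
      (by
        intro i _ hi2
        rw [hM0_def, List.getElem?_map, PySem.List.getElem?_pyRange_one,
          if_pos (by rw [hM0len] at hi2; omega), Option.map_some])
      (by left; omega)
    rw [show ((M0.length : Int) - (M0.length : Int)) = 0 by omega] at hRlen hRget
    rw [hcast] at hRlen hRget
    show ((PySem.List.pyRange 0 (PySem.List.len M0) 1).foldl outerStep (M0, 1, 1)).1
        = (PySem.List.pyRange 0 entrada 1).map (fun r =>
            (PySem.List.pyRange 0 entrada 1).map (fun c => |r - c| + 1))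
    rw [PySem.List.len_eq, hcast]
    apply List.ext_getElem?
    intro i
    by_cases hi : i < M0.length
    · rw [hRget i hi, if_pos (by omega), List.getElem?_map, PySem.List.getElem?_pyRange_one,
        if_pos (by rw [hM0len] at hi; omega), Option.map_some]
      simp only [zero_add]
      rfl
    · rw [List.getElem?_eq_none (by rw [hRlen]; omega),
        List.getElem?_eq_none (by simp [PySem.List.length_pyRange_one]; omega)]
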